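-- pv_equiv track=rewrite | github.com/imdinu/apple-mail-mcp | src/apple_mail_mcp/index/search.py | _tokenize_fts_query
-- ===== SOURCE A (Python) =====
-- def _tokenize_fts_query(query: str) -> list[str]:
--     """Split query into phrase blocks and bare tokens.
--
--     Balanced double-quoted segments are kept intact (including quotes).
--     Unbalanced quotes are dropped.
--
--     Returns:
--         List of tokens — quoted phrases and individual bare words.
--     """
--     tokens: list[str] = []
--     i = 0
--     n = len(query)
--
--     while i < n:
--         # Skip whitespace
--         if query[i].isspace():
--             i += 1
--             continue
--
--         # Check for opening double quote
--         if query[i] == '"':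
--             # Look for closing quote
--             end = query.find('"', i + 1)
--             if end != -1:
--                 # Balanced phrase — keep as-is
--                 tokens.append(query[i : end + 1])
--                 i = end + 1
--             else:
--                 # Unbalanced quote — skip it
--                 i += 1
--         else:
--             # Bare token — collect until whitespace or quote
--             start = i
--             while i < n and not query[i].isspace() and query[i] != '"':
--                 i += 1
--             tokens.append(query[start:i])
--
--     return tokens
-- ===== SOURCE B (Python) =====
-- import re
--
-- # One alternation does the whole job: a balanced quoted phrase (kept with its
-- # quotes, ending at the nearest closing quote) or a maximal bare run of
-- # non-whitespace, non-quote characters; findall skips whitespace and lone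
-- # unbalanced quotes automatically.
-- _FTS_TOKEN_RE = re.compile(r'"[^"]*"|[^\s"]+')
--
--
-- def _tokenize_fts_query(query: str) -> list[str]:
--     """Split query into phrase blocks and bare tokens (regex scan)."""
--     return _FTS_TOKEN_RE.findall(query)
-- ===== Notes on version B (the rewrite author's own statement) =====
-- stated objective: idiomatic
-- what changed: The hand-rolled index/while scanner (explicit cursor, str.find for the closing quote, inner bare-word collection loop) is replaced by a single compiled-regex findall scan over a two-branch alternation whose first branch captures a balanced quoted phrase up to the nearest closing quote and whose second captures a maximal bare run of non-whitespace, non-quote characters; findall itself skips whitespace and unbalanced quotes.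
import Mathlib
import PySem

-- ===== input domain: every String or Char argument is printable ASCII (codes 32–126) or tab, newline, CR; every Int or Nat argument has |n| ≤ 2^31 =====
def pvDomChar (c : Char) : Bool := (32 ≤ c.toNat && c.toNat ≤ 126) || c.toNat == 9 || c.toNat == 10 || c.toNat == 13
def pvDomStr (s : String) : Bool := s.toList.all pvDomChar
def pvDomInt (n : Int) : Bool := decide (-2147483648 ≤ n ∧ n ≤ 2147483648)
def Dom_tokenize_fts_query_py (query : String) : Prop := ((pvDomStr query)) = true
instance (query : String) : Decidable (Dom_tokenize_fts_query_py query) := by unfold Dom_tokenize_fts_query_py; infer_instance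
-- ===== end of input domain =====

-- B replaces A's manual index/while scanner by a single regex-findall scan (idiomatic
-- one-liner in Python); the agreement of the two is proved for all strings.

-- ===== PORT A =====
-- Inner while loop of A: advance i while i < n and query[i] is neither whitespace nor '"'.
-- The index grows by 1 per step, so fuel = n - i bounds the iterations exactly.
def tokenizeA_scan (s : List Char) (i : Nat) : Nat → Nat
  | 0 => i
  | fuel + 1 =>
    if h : i < s.length then
      if ¬ PySem.Chars.isspace s[i] ∧ s[i] ≠ '"' then tokenizeA_scan s (i + 1) fuel else i
    else i

-- Outer while loop of A: i strictly increases each iteration, so fuel = n - i suffices.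
def tokenizeA_loop (s : List Char) (tokens : List String) (i : Nat) : Nat → List String
  | 0 => tokens
  | fuel + 1 =>
    if h : i < s.length then
      if PySem.Chars.isspace s[i] then
        -- skip whitespace
        tokenizeA_loop s tokens (i + 1) fuel
      else if s[i] = '"' then
        -- end = query.find('"', i + 1); balanced → append query[i:end+1], i = end + 1
        if PySem.Chars.findFrom s ['"'] ((i : Int) + 1) ≠ -1 then
          tokenizeA_loop s
            (tokens ++ [String.mk (PySem.Chars.slice s (some (i : Int))
              (some (PySem.Chars.findFrom s ['"'] ((i : Int) + 1) + 1)))])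
            ((PySem.Chars.findFrom s ['"'] ((i : Int) + 1)).toNat + 1) fuel
        else
          -- unbalanced quote — skip it
          tokenizeA_loop s tokens (i + 1) fuel
      else
        -- bare token: inner while, then tokens.append(query[start:i])
        tokenizeA_loop s
          (tokens ++ [String.mk (PySem.Chars.slice s (some (i : Int))
            (some ((tokenizeA_scan s i (s.length - i) : Nat) : Int)))])
          (tokenizeA_scan s i (s.length - i)) fuel
    else tokens

def tokenize_fts_query_py (query : String) : List String :=
  tokenizeA_loop query.toList [] 0 query.toList.length

-- ===== PORT B =====
-- Source B: re.findall(r'"[^"]*"|[^\s"]+', query).  Hand port of findall over this fixed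
-- alternation (PySem has no regex engine), exact on the ASCII domain, where regex \s
-- coincides with str.isspace (= PySem.Chars.isspace): at each position try branch 1
-- ('"' then everything up to and including the nearest closing quote), else branch 2
-- (a maximal run of non-\s, non-quote characters), else findall advances one position.
def pvBareChar (c : Char) : Bool := !PySem.Chars.isspace c && c != '"'

def tokenizeB_findall : List Char → List String
  | [] => []
  | c :: rest =>
    if c = '"' then
      if '"' ∈ rest then
        -- branch '"[^"]*"' matches: the token ends at the nearest closing quote
        String.mk ('"' :: ((rest.takeWhile (· != '"')) ++ ['"'])) ::
          tokenizeB_findall (rest.dropWhile (· != '"')).tail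
      else
        -- no closing quote: neither branch matches here, findall advances
        tokenizeB_findall rest
    else if PySem.Chars.isspace c then
      -- neither branch matches on whitespace, findall advances
      tokenizeB_findall rest
    else
      -- branch '[^\s"]+' matches maximally
      String.mk ((c :: rest).takeWhile pvBareChar) ::
        tokenizeB_findall ((c :: rest).dropWhile pvBareChar)
termination_by s => s.length
decreasing_by
  · have h1 := List.length_dropWhile_le (· != '"') rest
    have h2 := List.length_tail (l := rest.dropWhile (· != '"'))
    simp only [List.length_cons]; omega
  · simp
  · simp
  · rename_i hq hs
    have hb : pvBareChar c = true := by
      simp only [pvBareChar, Bool.and_eq_true, Bool.not_eq_true', bne_iff_ne, ne_eq]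
      exact ⟨by simpa using hs, hq⟩
    rw [List.dropWhile_cons, if_pos hb]
    have := List.length_dropWhile_le pvBareChar rest
    simp only [List.length_cons]; omega

def tokenize_fts_query_py_alt (query : String) : List String :=
  tokenizeB_findall query.toList

-- ===== PRECONDITION & SPEC =====
def Spec_tokenize_fts_query_py (query : String) (out : List String) : Prop := out = tokenize_fts_query_py_alt query
instance (query : String) (out : List String) : Decidable (Spec_tokenize_fts_query_py query out) := by unfold Spec_tokenize_fts_query_py; infer_instance

-- ===== CLAIM (what is proved, stated in full; the proofs are below) =====
def Claim_equal_tokenize_fts_query_py : Prop := ∀ (query : String), Dom_tokenize_fts_query_py query → Spec_tokenize_fts_query_py query (tokenize_fts_query_py query)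

-- ===== LEMMAS AND PROOFS =====

theorem pv_single_prefix_iff (a : Char) (l : List Char) : [a] <+: l ↔ l.head? = some a := by
  cases l with
  | nil => simp
  | cons b t => simp [List.cons_prefix_cons, eq_comm]

theorem pv_prefix_drop_iff (a : Char) (l : List Char) (j : Nat) :
    [a] <+: l.drop j ↔ l[j]? = some a := by
  rw [pv_single_prefix_iff, List.head?_drop]

-- at the first occurrence of '"', takeWhile/dropWhile split exactly there
theorem pv_takeWhile_first (l : List Char) (k : Nat) (hk : l[k]? = some '"')
    (hlt : ∀ j < k, l[j]? ≠ some '"') :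
    l.takeWhile (· != '"') = l.take k ∧ l.dropWhile (· != '"') = l.drop k := by
  induction l generalizing k with
  | nil => simp at hk
  | cons b t ih =>
    cases k with
    | zero =>
      simp only [List.getElem?_cons_zero, Option.some.injEq] at hk
      subst hk
      simp
    | succ k =>
      have hb : b ≠ '"' := by
        have := hlt 0 (Nat.succ_pos _)
        simpa using this
      have ht := ih k (by simpa using hk)
        (fun j hj => by have := hlt (j + 1) (by omega); simpa using this)
      simp [hb, ht.1, ht.2]

-- the inner while loop of A computes i + length of the bare run
theorem pv_scan_spec (s : List Char) : ∀ (fuel i : Nat), i ≤ s.length → s.length - i ≤ fuel →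
    tokenizeA_scan s i fuel = i + ((s.drop i).takeWhile pvBareChar).length := by
  intro fuel
  induction fuel with
  | zero =>
    intro i hi hf
    have : i = s.length := by omega
    subst this
    simp [tokenizeA_scan]
  | succ fuel ih =>
    intro i hi hf
    by_cases h : i < s.length
    · have hdrop : s.drop i = s[i] :: s.drop (i + 1) := List.drop_eq_getElem_cons h
      by_cases hb : pvBareChar s[i] = true
      · have hcond : ¬ PySem.Chars.isspace s[i] ∧ s[i] ≠ '"' := by
          simpa [pvBareChar] using hb
        rw [tokenizeA_scan, dif_pos h, if_pos hcond, ih (i + 1) (by omega) (by omega),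
            hdrop, List.takeWhile_cons, if_pos hb]
        simp only [List.length_cons]
        omega
      · have hcond : ¬ (¬ PySem.Chars.isspace s[i] ∧ s[i] ≠ '"') := by
          intro hc
          exact hb (by simp [pvBareChar, hc.1, hc.2])
        rw [tokenizeA_scan, dif_pos h, if_neg hcond, hdrop, List.takeWhile_cons, if_neg hb]
        simp
    · have : i = s.length := by omega
      subst this
      simp [tokenizeA_scan]

-- slice with nonnegative endpoints
theorem pv_slice_nat (s : List Char) (a b : Nat) :
    PySem.Chars.slice s (some (a : Int)) (some (b : Int)) = (s.drop a).take (b - a) := by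
  rw [PySem.Chars.slice_eq_listSlice, PySem.List.slice_natCast]

-- the outer loop of A equals B's findall scan on the remaining suffix
theorem pv_loop_spec (s : List Char) : ∀ (fuel i : Nat) (acc : List String),
    i ≤ s.length → s.length - i ≤ fuel →
    tokenizeA_loop s acc i fuel = acc ++ tokenizeB_findall (s.drop i) := by
  intro fuel
  induction fuel with
  | zero =>
    intro i acc hi hf
    have : i = s.length := by omega
    subst this
    simp [tokenizeA_loop, tokenizeB_findall]
  | succ fuel ih =>
    intro i acc hi hf
    by_cases h : i < s.length
    · have hdrop : s.drop i = s[i] :: s.drop (i + 1) := List.drop_eq_getElem_cons h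
      by_cases hsp : PySem.Chars.isspace s[i] = true
      · -- whitespace: both sides skip one character
        have hq : s[i] ≠ '"' := by
          intro he; rw [he] at hsp; exact absurd hsp (by decide)
        rw [tokenizeA_loop, dif_pos h, if_pos hsp, ih (i + 1) acc (by omega) (by omega), hdrop,
            tokenizeB_findall, if_neg hq, if_pos hsp]
      · by_cases hq : s[i] = '"'
        · have hcast : ((i : Int) + 1) = ((i + 1 : Nat) : Int) := by push_cast; ring
          have hfind := PySem.Chars.findFrom_natCast s ['"'] (i + 1) (by omega)
          by_cases hf1 : PySem.Chars.find (s.drop (i + 1)) ['"'] = -1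
          · -- unbalanced quote: both sides skip it
            have hnotmem : ¬ '"' ∈ s.drop (i + 1) := by
              intro hmem
              obtain ⟨u, v, huv⟩ := List.append_of_mem hmem
              exact (PySem.Chars.find_eq_neg_one_iff _ _).mp hf1 ⟨u, v, by rw [huv]; simp⟩
            have he : PySem.Chars.findFrom s ['"'] ((i : Int) + 1) = -1 := by
              rw [hcast, hfind, if_pos hf1]
            rw [tokenizeA_loop, dif_pos h, if_neg hsp, if_pos hq, if_neg (by simp [he]),
                ih (i + 1) acc (by omega) (by omega), hdrop, tokenizeB_findall, if_pos hq,
                if_neg hnotmem]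
          · -- balanced phrase
            have h0 : (0 : Int) ≤ PySem.Chars.find (s.drop (i + 1)) ['"'] := by
              have := PySem.Chars.neg_one_le_find (s.drop (i + 1)) ['"']
              omega
            set k : Nat := (PySem.Chars.find (s.drop (i + 1)) ['"']).toNat with hkdef
            have hkval : PySem.Chars.find (s.drop (i + 1)) ['"'] = (k : Int) := by omega
            obtain ⟨hpref, hfirst⟩ := PySem.Chars.find_spec (s := s.drop (i + 1)) (sub := ['"']) h0
            rw [← hkdef] at hpref hfirst
            have hgk : (s.drop (i + 1))[k]? = some '"' := (pv_prefix_drop_iff _ _ _).mp hpref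
            have hglt : ∀ j < k, (s.drop (i + 1))[j]? ≠ some '"' := by
              intro j hj hc
              exact hfirst j hj ((pv_prefix_drop_iff _ _ _).mpr hc)
            obtain ⟨hklen, -⟩ := List.getElem?_eq_some_iff.mp hgk
            have hklen' : k < s.length - (i + 1) := by
              simpa [List.length_drop] using hklen
            have he : PySem.Chars.findFrom s ['"'] ((i : Int) + 1) = ((i + 1 + k : Nat) : Int) := by
              rw [hcast, hfind, if_neg hf1, hkval]; push_cast; ring
            have hene : PySem.Chars.findFrom s ['"'] ((i : Int) + 1) ≠ -1 := by
              rw [he]; omega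
            have hmem : '"' ∈ s.drop (i + 1) := List.mem_of_getElem? hgk
            obtain ⟨htw, hdw⟩ := pv_takeWhile_first (s.drop (i + 1)) k hgk hglt
            have hto : (((i + 1 + k : Nat) : Int)).toNat + 1 = i + k + 2 := by
              omega
            have hslice : PySem.Chars.slice s (some (i : Int)) (some (((i + 1 + k : Nat) : Int) + 1)) =
                '"' :: (((s.drop (i + 1)).takeWhile (· != '"')) ++ ['"']) := by
              have hc2 : (((i + 1 + k : Nat) : Int) + 1) = ((i + k + 2 : Nat) : Int) := by
                push_cast; ring
              rw [hc2, pv_slice_nat]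
              have h2 : i + k + 2 - i = k + 2 := by omega
              rw [h2, hdrop, List.take_succ_cons, List.take_succ, hgk, htw]
              simp [hq]
            have hcont : ((s.drop (i + 1)).drop k).tail = s.drop (i + k + 2) := by
              rw [List.tail_drop, List.drop_drop]
              congr 1
            rw [tokenizeA_loop, dif_pos h, if_neg hsp, if_pos hq, if_pos hene, he, hslice, hto,
                ih (i + k + 2) _ (by omega) (by omega),
                hdrop, tokenizeB_findall, if_pos hq, if_pos hmem, hdw, hcont]
            simp
        · -- bare token
          have hb : pvBareChar s[i] = true := by simp [pvBareChar, hsp, hq]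
          have hscan := pv_scan_spec s (s.length - i) i (by omega) (le_refl _)
          set L : Nat := ((s.drop i).takeWhile pvBareChar).length with hLdef
          have hL1 : 1 ≤ L := by
            rw [hLdef, hdrop, List.takeWhile_cons, if_pos hb]
            simp
          have hLle : L ≤ s.length - i := by
            have := (List.takeWhile_prefix (l := s.drop i) pvBareChar).length_le
            rw [← hLdef] at this
            simpa [List.length_drop] using this
          have htok : PySem.Chars.slice s (some (i : Int)) (some ((i + L : Nat) : Int)) =
              (s.drop i).takeWhile pvBareChar := by
            rw [pv_slice_nat]
            have h2 : i + L - i = L := by omega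
            rw [h2, hLdef]
            exact ((List.prefix_iff_eq_take).mp (List.takeWhile_prefix _)).symm
          have hdw : s.drop (i + L) = (s.drop i).dropWhile pvBareChar := by
            have : s.drop (i + L) = (s.drop i).drop L := by
              rw [List.drop_drop]
            rw [this]
            conv_lhs => rw [← List.takeWhile_append_dropWhile (p := pvBareChar) (l := s.drop i)]
            rw [List.drop_left' hLdef.symm]
          rw [tokenizeA_loop, dif_pos h, if_neg hsp, if_neg hq, hscan, htok,
              ih (i + L) _ (by omega) (by omega), hdw]
          rw [hdrop, tokenizeB_findall, if_neg hq, if_neg hsp, ← hdrop]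
          simp
    · have : i = s.length := by omega
      subst this
      rw [tokenizeA_loop]
      simp [tokenizeB_findall]

-- ===== VERDICT (by name: the statement is the Claim_ definition above) =====
theorem tokenize_fts_query_py_spec : Claim_equal_tokenize_fts_query_py := by
  intro query _
  unfold Spec_tokenize_fts_query_py tokenize_fts_query_py tokenize_fts_query_py_alt
  rw [pv_loop_spec query.toList query.toList.length 0 [] (by omega) (by omega)]
  simp
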